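-- pv_equiv track=rewrite | github.com/iamadoctorforreal/Video-Generator-Workflow | app4.py | sanitize_text_for_tts
-- ===== SOURCE A (Python) =====
-- def sanitize_text_for_tts(text):
--     """Fix problematic words for Kokoro TTS"""
--     # Replace Japanese names that cause issues
--     replacements = {
--         'Aiko': 'Eye-ko',
--         'Haru': 'Ha-roo',
--         'Yuki': 'You-kee',
--         'Sora': 'So-rah',
--         'Ren': 'Ren',
--         'Kaito': 'Kai-toe',
--         'Mei': 'May'
--     }
--
--     sanitized = text
--     for original, replacement in replacements.items():
--         sanitized = sanitized.replace(original, replacement)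
--
--     return sanitized
-- ===== SOURCE B (Python) =====
-- # B: single left-to-right scan replacing each fixed name via one table lookup
-- # (one pass over the text instead of seven successive full-string .replace passes).
-- def sanitize_text_for_tts(text):
--     """Fix problematic words for Kokoro TTS"""
--     replacements = {
--         'Aiko': 'Eye-ko',
--         'Haru': 'Ha-roo',
--         'Yuki': 'You-kee',
--         'Sora': 'So-rah',
--         'Ren': 'Ren',
--         'Kaito': 'Kai-toe',
--         'Mei': 'May'
--     }
--     out = []
--     i = 0
--     n = len(text)
--     while i < n:
--         for name, rep in replacements.items():
--             if text.startswith(name, i):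
--                 out.append(rep)
--                 i += len(name)
--                 break
--         else:
--             out.append(text[i])
--             i += 1
--     return ''.join(out)
-- ===== Notes on version B (the rewrite author's own statement) =====
-- stated objective: alternative
-- what changed: B makes a single left-to-right scan over the text, replacing each fixed name via one table lookup per position, instead of A's seven successive full-string str.replace passes; the keys never overlap and the replacements reintroduce no keys, so the outputs coincide.
import Mathlib
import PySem

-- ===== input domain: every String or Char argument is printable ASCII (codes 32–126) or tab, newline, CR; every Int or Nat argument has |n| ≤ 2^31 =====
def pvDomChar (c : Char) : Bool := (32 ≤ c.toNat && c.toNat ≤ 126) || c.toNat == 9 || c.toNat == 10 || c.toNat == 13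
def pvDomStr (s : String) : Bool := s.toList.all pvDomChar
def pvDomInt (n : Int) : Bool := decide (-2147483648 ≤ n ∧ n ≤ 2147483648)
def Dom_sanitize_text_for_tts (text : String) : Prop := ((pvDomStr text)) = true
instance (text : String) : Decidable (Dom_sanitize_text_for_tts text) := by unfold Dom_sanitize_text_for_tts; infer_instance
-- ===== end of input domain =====

-- B replaces A's seven successive full-string .replace passes by ONE left-to-right scan
-- that replaces each fixed name via a table lookup (objective: alternative single-pass algorithm).

-- ===== PORT A =====
def sanitize_text_for_tts (text : String) : String :=
  let replacements : PySem.Dict String String :=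
    PySem.Dict.ofList [("Aiko", "Eye-ko"), ("Haru", "Ha-roo"), ("Yuki", "You-kee"),
      ("Sora", "So-rah"), ("Ren", "Ren"), ("Kaito", "Kai-toe"), ("Mei", "May")]
  replacements.items.foldl (fun sanitized p => PySem.Str.replace sanitized p.1 p.2) text

-- ===== PORT B =====
-- the replacement table, as (name, replacement) pairs of char lists
def pvReplPairs : List (List Char × List Char) :=
  [("Aiko".toList, "Eye-ko".toList), ("Haru".toList, "Ha-roo".toList),
   ("Yuki".toList, "You-kee".toList), ("Sora".toList, "So-rah".toList),
   ("Ren".toList, "Ren".toList), ("Kaito".toList, "Kai-toe".toList),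
   ("Mei".toList, "May".toList)]

-- B's while-loop: at each position try the names in table order (text.startswith);
-- on a match emit the replacement and skip the name's length, else emit the char.
-- (`t.drop (p.1.length - 1)` is `(c :: t).drop p.1.length`: every name is nonempty.)
def pvScan : List Char → List Char
  | [] => []
  | c :: t =>
    match pvReplPairs.find? (fun p => p.1.isPrefixOf (c :: t)) with
    | some p => p.2 ++ pvScan (t.drop (p.1.length - 1))
    | none => c :: pvScan t
termination_by l => l.length
decreasing_by · simp only [List.length_drop, List.length_cons]; omega
              · simp

def sanitize_text_for_tts_alt (text : String) : String :=
  String.ofList (pvScan text.toList)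

-- ===== PRECONDITION & SPEC =====
def Spec_sanitize_text_for_tts (text : String) (out : String) : Prop := out = sanitize_text_for_tts_alt text
instance (text : String) (out : String) : Decidable (Spec_sanitize_text_for_tts text out) := by unfold Spec_sanitize_text_for_tts; infer_instance

-- ===== CLAIM (what is proved, stated in full; the proofs are below) =====
def Claim_equal_sanitize_text_for_tts : Prop := ∀ (text : String), Dom_sanitize_text_for_tts text → Spec_sanitize_text_for_tts text (sanitize_text_for_tts text)

-- ===== LEMMAS AND PROOFS =====

-- A single Python `s.replace(old, new)` (old nonempty) as the same left-to-right scan shape.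
def repScan (old new : List Char) : List Char → List Char
  | [] => []
  | c :: t =>
    if old.isPrefixOf (c :: t) then new ++ repScan old new (t.drop (old.length - 1))
    else c :: repScan old new t
termination_by l => l.length
decreasing_by · simp only [List.length_drop, List.length_cons]; omega
              · simp

lemma repScan_nil (old new : List Char) : repScan old new [] = [] := by rw [repScan]

lemma repScan_neg (old new : List Char) (c : Char) (t : List Char)
    (h : ¬ old.isPrefixOf (c :: t) = true) :
    repScan old new (c :: t) = c :: repScan old new t := by
  rw [repScan, if_neg h]

lemma repScan_pos (old new X : List Char) (ho : old ≠ []) :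
    repScan old new (old ++ X) = new ++ repScan old new X := by
  obtain ⟨o, ot, rfl⟩ := List.exists_cons_of_ne_nil ho
  rw [List.cons_append, repScan]
  have hpre : (o :: ot).isPrefixOf (o :: (ot ++ X)) = true := by
    rw [List.isPrefixOf_iff_prefix]
    exact (o :: ot).prefix_append X
  rw [hpre]
  simp

-- go with enough fuel computes repScan (old nonempty)
lemma go_eq_repScan (old new : List Char) (ho : old ≠ []) :
    ∀ (fuel : Nat) (l acc : List Char), l.length ≤ fuel →
      PySem.Chars.replace.go old new fuel l acc = acc.reverse ++ repScan old new l := by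
  intro fuel
  induction fuel with
  | zero =>
    intro l acc hl
    have : l = [] := List.eq_nil_of_length_eq_zero (Nat.le_zero.mp hl)
    subst this
    rw [PySem.Chars.replace.go]
    all_goals simp [repScan_nil]
  | succ fuel ih =>
    intro l acc hl
    match l with
    | [] =>
      rw [PySem.Chars.replace.go]
      all_goals simp [repScan_nil]
    | c :: t =>
      rw [PySem.Chars.replace.go]
      by_cases hpre : old.isPrefixOf (c :: t)
      · rw [if_pos hpre]
        have hlen : old.length = (old.length - 1) + 1 := by
          have : 0 < old.length := List.length_pos_of_ne_nil ho
          omega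
        have hdrop : List.drop old.length (c :: t) = t.drop (old.length - 1) := by
          conv_lhs => rw [hlen]
          rw [List.drop_succ_cons]
        rw [hdrop, ih _ _ (by simp [List.length_drop] at *; omega)]
        rw [repScan, if_pos hpre]
        simp
      · rw [if_neg hpre, ih _ _ (by simp at hl; omega)]
        rw [repScan_neg old new c t hpre]
        simp

lemma replace_eq_repScan (s old new : List Char) (ho : old ≠ []) :
    PySem.Chars.replace s old new = repScan old new s := by
  rw [PySem.Chars.replace]
  rw [if_neg (by simpa using ho)]
  simpa using go_eq_repScan old new ho s.length s [] le_rfl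

-- a replace pass walks over a block that nowhere contains old's first char
lemma repScan_skip (old new : List Char) (hc : Char) (hh : old.head? = some hc) :
    ∀ (b X : List Char), hc ∉ b →
      repScan old new (b ++ X) = b ++ repScan old new X := by
  intro b
  induction b with
  | nil => intro X _; rfl
  | cons c b' ih =>
    intro X hb
    cases old with
    | nil => simp at hh
    | cons o ot =>
      have hne : ¬ (o :: ot).isPrefixOf (c :: (b' ++ X)) = true := by
        rw [List.isPrefixOf_iff_prefix]
        intro hpre
        have ho : o = hc := by simpa using hh
        have : hc = c := by rw [← ho]; exact (List.cons_prefix_cons.mp hpre).1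
        exact hb (this ▸ List.mem_cons_self ..)
      rw [List.cons_append, repScan_neg _ _ _ _ hne]
      rw [ih X (fun h => hb (List.mem_cons_of_mem _ h))]
      simp

-- a word whose chars never start any replacement string survives a replace pass backwards
lemma prefix_of_repScan (old new : List Char) (hn : new ≠ []) :
    ∀ (X w : List Char), (∀ ch ∈ w, new.head? ≠ some ch) →
      w <+: repScan old new X → w <+: X := by
  intro X
  induction X with
  | nil => intro w _ h; rwa [repScan_nil] at h
  | cons c t ih =>
    intro w hw h
    by_cases hpre : old.isPrefixOf (c :: t)
    · rw [repScan, if_pos hpre] at h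
      match w with
      | [] => exact List.nil_prefix
      | w0 :: w' =>
        exfalso
        obtain ⟨n0, n', rfl⟩ := List.exists_cons_of_ne_nil hn
        rw [List.cons_append] at h
        have : w0 = n0 := (List.cons_prefix_cons.mp h).1
        exact hw w0 (List.mem_cons_self ..) (by simp [this])
    · rw [repScan_neg _ _ _ _ hpre] at h
      match w with
      | [] => exact List.nil_prefix
      | w0 :: w' =>
        obtain ⟨h0, h1⟩ := List.cons_prefix_cons.mp h
        exact List.cons_prefix_cons.mpr ⟨h0, ih w' (fun ch hch => hw ch (List.mem_cons_of_mem _ hch)) h1⟩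

-- the sequential application of a list of replace passes
def chainOf (ps : List (List Char × List Char)) (l : List Char) : List Char :=
  ps.foldl (fun s p => repScan p.1 p.2 s) l

lemma chainOf_nil : ∀ ps : List (List Char × List Char), chainOf ps [] = [] := by
  intro ps
  induction ps with
  | nil => rfl
  | cons p ps ih => show chainOf ps (repScan p.1 p.2 []) = []; rw [repScan_nil]; exact ih

-- the head chars of all names and of all replacement strings
def pvKeyHeads : List Char := ['A', 'H', 'Y', 'S', 'R', 'K', 'M']
def pvRepHeads : List Char := ['E', 'H', 'Y', 'S', 'R', 'K', 'M']

lemma chainOf_skip (ps : List (List Char × List Char)) (b : List Char)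
    (hb : ∀ p ∈ ps, ∃ hc ∈ pvKeyHeads, p.1.head? = some hc ∧ hc ∉ b) :
    ∀ X, chainOf ps (b ++ X) = b ++ chainOf ps X := by
  induction ps with
  | nil => intro X; rfl
  | cons p ps ih =>
    intro X
    obtain ⟨hc, _, hh, hm⟩ := hb p (List.mem_cons_self ..)
    show chainOf ps (repScan p.1 p.2 (b ++ X)) = b ++ chainOf ps (repScan p.1 p.2 X)
    rw [repScan_skip p.1 p.2 hc hh b X hm]
    exact ih (fun q hq => hb q (List.mem_cons_of_mem _ hq)) _

lemma keyFacts : ∀ p ∈ pvReplPairs, p.1 ≠ [] ∧ p.2 ≠ [] ∧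
    (∃ hr ∈ pvRepHeads, p.2.head? = some hr) ∧
    (∀ ch ∈ p.1.tail, ch ∉ pvRepHeads) := by simp [pvReplPairs, pvRepHeads]

lemma chain_nomatch (c : Char) :
    ∀ (ps : List (List Char × List Char)), (∀ p ∈ ps, p ∈ pvReplPairs) →
    ∀ (t Y : List Char),
      (∀ w : List Char, (∀ ch ∈ w, ch ∉ pvRepHeads) → w <+: Y → w <+: t) →
      (∀ p ∈ ps, ¬ p.1 <+: (c :: t)) →
      chainOf ps (c :: Y) = c :: chainOf ps Y := by
  intro ps
  induction ps with
  | nil => intro _ _ _ _ _; rfl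
  | cons p ps ih =>
    intro hmem t Y htrans hno
    have hp := hmem p (List.mem_cons_self ..)
    obtain ⟨hk, hr, ⟨hrc, hrin, hhr⟩, htail⟩ := keyFacts p hp
    have hnp : ¬ p.1.isPrefixOf (c :: Y) = true := by
      rw [List.isPrefixOf_iff_prefix]
      intro hpre
      obtain ⟨k0, kt, hkeq⟩ := List.exists_cons_of_ne_nil hk
      rw [hkeq] at hpre
      obtain ⟨h0, h1⟩ := List.cons_prefix_cons.mp hpre
      have : kt <+: t := htrans kt (by intro ch hch; exact htail ch (by rw [hkeq]; simpa using hch)) h1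
      exact hno p (List.mem_cons_self ..) (by rw [hkeq, h0]; exact List.cons_prefix_cons.mpr ⟨rfl, this⟩)
    show chainOf ps (repScan p.1 p.2 (c :: Y)) = c :: chainOf ps (repScan p.1 p.2 Y)
    rw [repScan_neg _ _ _ _ hnp]
    refine ih (fun q hq => hmem q (List.mem_cons_of_mem _ hq)) t (repScan p.1 p.2 Y) ?_
      (fun q hq => hno q (List.mem_cons_of_mem _ hq))
    intro w hw hpre
    refine htrans w hw (prefix_of_repScan p.1 p.2 hr Y w ?_ hpre)
    intro ch hch heq
    rw [hhr] at heq
    exact hw ch hch (Option.some_inj.mp heq ▸ hrin)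

lemma chain_match (pre post : List (List Char × List Char)) (k r : List Char)
    (hk : k ≠ [])
    (h1 : ∀ p ∈ pre, ∃ hc ∈ pvKeyHeads, p.1.head? = some hc ∧ hc ∉ k)
    (h3 : ∀ p ∈ post, ∃ hc ∈ pvKeyHeads, p.1.head? = some hc ∧ hc ∉ r) :
    ∀ X, chainOf (pre ++ (k, r) :: post) (k ++ X) = r ++ chainOf (pre ++ (k, r) :: post) X := by
  intro X
  unfold chainOf
  rw [List.foldl_append, List.foldl_append]
  show chainOf ((k, r) :: post) (chainOf pre (k ++ X)) = r ++ chainOf ((k, r) :: post) (chainOf pre X)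
  rw [chainOf_skip pre k h1 X]
  show chainOf post (repScan k r (k ++ chainOf pre X)) = r ++ chainOf post (repScan k r (chainOf pre X))
  rw [repScan_pos k r _ hk]
  exact chainOf_skip post r h3 _

lemma chain_match_mem (p : List Char × List Char) (hp : p ∈ pvReplPairs) :
    ∀ X, chainOf pvReplPairs (p.1 ++ X) = p.2 ++ chainOf pvReplPairs X := by
  fin_cases hp
  · exact chain_match [] _ _ _ (by simp) (by simp [pvKeyHeads]) (by simp [pvKeyHeads])
  · exact chain_match [("Aiko".toList, "Eye-ko".toList)] _ _ _ (by simp) (by simp [pvKeyHeads]) (by simp [pvKeyHeads])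
  · exact chain_match [("Aiko".toList, "Eye-ko".toList), ("Haru".toList, "Ha-roo".toList)] _ _ _
      (by simp) (by simp [pvKeyHeads]) (by simp [pvKeyHeads])
  · exact chain_match [("Aiko".toList, "Eye-ko".toList), ("Haru".toList, "Ha-roo".toList),
      ("Yuki".toList, "You-kee".toList)] _ _ _ (by simp) (by simp [pvKeyHeads]) (by simp [pvKeyHeads])
  · exact chain_match [("Aiko".toList, "Eye-ko".toList), ("Haru".toList, "Ha-roo".toList),
      ("Yuki".toList, "You-kee".toList), ("Sora".toList, "So-rah".toList)] _ _ _
      (by simp) (by simp [pvKeyHeads]) (by simp [pvKeyHeads])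
  · exact chain_match [("Aiko".toList, "Eye-ko".toList), ("Haru".toList, "Ha-roo".toList),
      ("Yuki".toList, "You-kee".toList), ("Sora".toList, "So-rah".toList),
      ("Ren".toList, "Ren".toList)] _ _ _ (by simp) (by simp [pvKeyHeads]) (by simp [pvKeyHeads])
  · exact chain_match [("Aiko".toList, "Eye-ko".toList), ("Haru".toList, "Ha-roo".toList),
      ("Yuki".toList, "You-kee".toList), ("Sora".toList, "So-rah".toList),
      ("Ren".toList, "Ren".toList), ("Kaito".toList, "Kai-toe".toList)] _ _ _
      (by simp) (by simp [pvKeyHeads]) (by simp [pvKeyHeads])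

lemma pvScan_cons (c : Char) (t : List Char) :
    pvScan (c :: t) =
      match pvReplPairs.find? (fun p => p.1.isPrefixOf (c :: t)) with
      | some p => p.2 ++ pvScan (t.drop (p.1.length - 1))
      | none => c :: pvScan t := by
  rw [pvScan]

lemma chain_eq_scan : ∀ l : List Char, chainOf pvReplPairs l = pvScan l := by
  intro l
  generalize hn : l.length = n
  induction n using Nat.strong_induction_on generalizing l with
  | _ n ih =>
    match l, hn with
    | [], _ => rw [chainOf_nil, pvScan]
    | c :: t, hn =>
      cases hf : pvReplPairs.find? (fun p => p.1.isPrefixOf (c :: t)) with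
      | none =>
        have hno : ∀ p ∈ pvReplPairs, ¬ p.1 <+: (c :: t) := by
          intro p hp hpre
          have := List.find?_eq_none.mp hf p hp
          exact this (by rwa [List.isPrefixOf_iff_prefix])
        rw [chain_nomatch c pvReplPairs (fun p hp => hp) t t (fun _ _ h => h) hno]
        rw [pvScan_cons, hf]
        have hlt : t.length < n := by
          have hc : (c :: t).length = t.length + 1 := List.length_cons ..
          omega
        rw [ih t.length hlt t rfl]
      | some p =>
        have hp : p ∈ pvReplPairs := List.mem_of_find?_eq_some hf
        have hpre : p.1 <+: (c :: t) := by
          have := List.find?_some hf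
          rwa [List.isPrefixOf_iff_prefix] at this
        obtain ⟨rest, hrest⟩ := hpre
        obtain ⟨hk, _, _, _⟩ := keyFacts p hp
        have hklen : p.1.length = (p.1.length - 1) + 1 := by
          have := List.length_pos_of_ne_nil hk; omega
        have hrestdrop : rest = t.drop (p.1.length - 1) := by
          have h1 : (p.1 ++ rest).drop p.1.length = rest := List.drop_left
          rw [hrest] at h1
          rw [← h1, hklen, List.drop_succ_cons]
          simp
        rw [pvScan_cons, hf]
        rw [← hrest, chain_match_mem p hp rest]
        have hlt : (t.drop (p.1.length - 1)).length < n := by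
          simp only [List.length_drop]
          have := List.length_cons (a := c) (as := t)
          omega
        rw [hrestdrop, ih _ hlt _ rfl]

lemma A_toList (text : String) :
    (sanitize_text_for_tts text).toList = chainOf pvReplPairs text.toList := by
  have hitems : (PySem.Dict.ofList [("Aiko", "Eye-ko"), ("Haru", "Ha-roo"), ("Yuki", "You-kee"),
      ("Sora", "So-rah"), ("Ren", "Ren"), ("Kaito", "Kai-toe"), ("Mei", "May")]
      : PySem.Dict String String).items =
      [("Aiko", "Eye-ko"), ("Haru", "Ha-roo"), ("Yuki", "You-kee"),
       ("Sora", "So-rah"), ("Ren", "Ren"), ("Kaito", "Kai-toe"), ("Mei", "May")] := by decide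
  show (List.foldl _ text _).toList = _
  rw [hitems]
  simp only [List.foldl, PySem.Str.toList_replace]
  rw [replace_eq_repScan _ _ _ (by decide), replace_eq_repScan _ _ _ (by decide),
      replace_eq_repScan _ _ _ (by decide), replace_eq_repScan _ _ _ (by decide),
      replace_eq_repScan _ _ _ (by decide), replace_eq_repScan _ _ _ (by decide),
      replace_eq_repScan _ _ _ (by decide)]
  rfl

-- ===== VERDICT (by name: the statement is the Claim_ definition above) =====
theorem sanitize_text_for_tts_spec : Claim_equal_sanitize_text_for_tts := by
  intro text _
  unfold Spec_sanitize_text_for_tts sanitize_text_for_tts_alt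
  apply String.toList_inj.mp
  rw [A_toList, chain_eq_scan]
  simp
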